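-- pv_equiv track=rewrite | github.com/pypi-data/pypi-mirror-187 | packages/bodo/bodo-2023.1rc5-cp38-cp38-manylinux2014_x86_64.manylinux_2_17_x86_64.whl/bodo/libs/bodosql_regexp_array_kernels.py | posix_to_re
-- ===== SOURCE A (Python) =====
-- def posix_to_re(pattern):
--     fkjxu__soprm = {'[:alnum:]': 'A-Za-z0-9', '[:alpha:]': 'A-Za-z',
--         '[:ascii:]': '\x01-\x7f', '[:blank:]': ' \t', '[:cntrl:]':
--         '\x01-\x1f\x7f', '[:digit:]': '0-9', '[:graph:]': '!-~',
--         '[:lower:]': 'a-z', '[:print:]': ' -~', '[:punct:]':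
--         '\\]\\[!"#$%&\'()*+,./:;<=>?@\\^_`{|}~-', '[:space:]':
--         ' \t\r\n\x0b\x0c', '[:upper:]': 'A-Z', '[:word:]': 'A-Za-z0-9_',
--         '[:xdigit:]': 'A-Fa-f0-9'}
--     for yxnzy__qedx in fkjxu__soprm:
--         pattern = pattern.replace(yxnzy__qedx, fkjxu__soprm[yxnzy__qedx])
--     return pattern
-- ===== SOURCE B (Python) =====
-- def posix_to_re(pattern):
--     classes = {'alnum': 'A-Za-z0-9', 'alpha': 'A-Za-z', 'ascii': '\x01-\x7f',
--         'blank': ' \t', 'cntrl': '\x01-\x1f\x7f', 'digit': '0-9',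
--         'graph': '!-~', 'lower': 'a-z', 'print': ' -~',
--         'punct': '\\]\\[!"#$%&\'()*+,./:;<=>?@\\^_`{|}~-',
--         'space': ' \t\r\n\x0b\x0c', 'upper': 'A-Z', 'word': 'A-Za-z0-9_',
--         'xdigit': 'A-Fa-f0-9'}
--     out = []
--     i = 0
--     n = len(pattern)
--     while i < n:
--         if pattern.startswith('[:', i):
--             j = i + 2
--             while j < n and 'a' <= pattern[j] <= 'z':
--                 j += 1
--             name = pattern[i + 2:j]
--             if pattern.startswith(':]', j) and name in classes:
--                 out.append(classes[name])
--                 i = j + 2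
--                 continue
--         out.append(pattern[i])
--         i += 1
--     return ''.join(out)
-- ===== Notes on version B (the rewrite author's own statement) =====
-- stated objective: alternative
-- what changed: A makes 14 sequential full-string str.replace passes, one per bracketed POSIX token; B makes a single left-to-right pass that parses the bracketed class syntax itself (open bracket, colon, a lowercase-letter run, colon, close bracket) and looks the bare class name up in a dict, so it never searches for the full bracketed tokens at all.
import Mathlib
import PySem

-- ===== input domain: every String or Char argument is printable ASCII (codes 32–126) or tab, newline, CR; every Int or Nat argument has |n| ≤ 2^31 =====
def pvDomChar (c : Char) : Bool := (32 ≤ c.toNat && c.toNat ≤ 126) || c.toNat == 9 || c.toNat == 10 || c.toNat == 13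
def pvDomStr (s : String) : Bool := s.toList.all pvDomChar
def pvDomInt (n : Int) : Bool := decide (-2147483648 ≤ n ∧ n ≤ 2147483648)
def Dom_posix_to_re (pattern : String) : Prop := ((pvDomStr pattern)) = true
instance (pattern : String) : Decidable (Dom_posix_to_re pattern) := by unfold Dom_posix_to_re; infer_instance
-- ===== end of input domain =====

-- B replaces A's 14 sequential full-string str.replace passes by one left-to-right pass that
-- parses the bracketed POSIX class syntax itself and looks the bare class name up (objective:
-- alternative algorithm, same result; no speed claim).

-- ===== PORT A =====
-- the dict literal of A, as an association list in insertion order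
def pvMap : List (String × String) :=
  [("[:alnum:]", "A-Za-z0-9"), ("[:alpha:]", "A-Za-z"),
   ("[:ascii:]", "\x01-\x7f"), ("[:blank:]", " \t"),
   ("[:cntrl:]", "\x01-\x1f\x7f"), ("[:digit:]", "0-9"),
   ("[:graph:]", "!-~"), ("[:lower:]", "a-z"), ("[:print:]", " -~"),
   ("[:punct:]", "\\]\\[!\"#$%&'()*+,./:;<=>?@\\^_`{|}~-"),
   ("[:space:]", " \t\r\n\x0b\x0c"), ("[:upper:]", "A-Z"),
   ("[:word:]", "A-Za-z0-9_"), ("[:xdigit:]", "A-Fa-f0-9")]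

-- 'for key in dict: pattern = pattern.replace(key, dict[key])'
def posix_to_re (pattern : String) : String :=
  pvMap.foldl (fun p kv => PySem.Str.replace p kv.1 kv.2) pattern

-- ===== PORT B =====
-- Source B's dict keyed by the bare class name, as char lists
def pvClasses : List (List Char × List Char) :=
  [("alnum".toList, "A-Za-z0-9".toList), ("alpha".toList, "A-Za-z".toList),
   ("ascii".toList, "\x01-\x7f".toList), ("blank".toList, " \t".toList),
   ("cntrl".toList, "\x01-\x1f\x7f".toList), ("digit".toList, "0-9".toList),
   ("graph".toList, "!-~".toList), ("lower".toList, "a-z".toList),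
   ("print".toList, " -~".toList),
   ("punct".toList, "\\]\\[!\"#$%&'()*+,./:;<=>?@\\^_`{|}~-".toList),
   ("space".toList, " \t\r\n\x0b\x0c".toList), ("upper".toList, "A-Z".toList),
   ("word".toList, "A-Za-z0-9_".toList), ("xdigit".toList, "A-Fa-f0-9".toList)]

-- "'a' <= pattern[j] <= 'z'" of Source B (Python compares single chars by code point, as Char ≤ does)
def pvIsLo (c : Char) : Bool := 'a' ≤ c && c ≤ 'z'

-- the body of Source B's startswith-guarded block: try to parse a class token at the
-- front of l; on success return (replacement, input after the token)
def pvTryClass (l : List Char) : Option (List Char × List Char) :=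
  match l with
  | '[' :: ':' :: rest =>
    match rest.dropWhile pvIsLo with
    | ':' :: ']' :: tail =>
      match pvClasses.find? (fun kv => kv.1 == rest.takeWhile pvIsLo) with
      | some kv => some (kv.2, tail)
      | none => none
    | _ => none
  | _ => none

-- termination helper for pvScanB (cited in decreasing_by)
lemma pvTryClass_lt (l : List Char) (rt : List Char × List Char)
    (h : pvTryClass l = some rt) : rt.2.length < l.length := by
  unfold pvTryClass at h
  split at h
  · split at h
    · split at h
      · rename_i rest x1 tail hdw x2 kv hfd
        injection h with h
        subst h
        have h1 := List.length_dropWhile_le (p := pvIsLo) (l := rest)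
        rw [hdw] at h1
        simp at h1 ⊢
        omega
      · exact absurd h (by simp)
    · exact absurd h (by simp)
  · exact absurd h (by simp)

-- Source B's while loop: parse a class token at each position, else copy one character
def pvScanB (l : List Char) : List Char :=
  match l with
  | [] => []
  | c :: cs =>
    match h : pvTryClass (c :: cs) with
    | some rt => rt.1 ++ pvScanB rt.2
    | none => c :: pvScanB cs
  termination_by l.length
  decreasing_by
  · exact pvTryClass_lt _ _ h
  · simp

def posix_to_re_alt (pattern : String) : String :=
  String.ofList (pvScanB pattern.toList)

-- ===== PRECONDITION & SPEC =====
def Spec_posix_to_re (pattern : String) (out : String) : Prop := out = posix_to_re_alt pattern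
instance (pattern : String) (out : String) : Decidable (Spec_posix_to_re pattern out) := by unfold Spec_posix_to_re; infer_instance

-- ===== CLAIM (what is proved, stated in full; the proofs are below) =====
def Claim_equal_posix_to_re : Prop := ∀ (pattern : String), Dom_posix_to_re pattern → Spec_posix_to_re pattern (posix_to_re pattern)

-- ===== LEMMAS AND PROOFS =====

-- A's table on the char-list side, and the first-match scan pvScan that both ports are reduced to.
def pvTableC : List (List Char × List Char) := pvMap.map (fun kv => (kv.1.toList, kv.2.toList))

def pvFind (tbl : List (List Char × List Char)) (l : List Char) : Option (List Char × List Char) :=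
  tbl.find? (fun kv => kv.1.isPrefixOf l)

def pvScan (tbl : List (List Char × List Char)) (l : List Char) : List Char :=
  match l with
  | [] => []
  | c :: cs =>
    match pvFind tbl (c :: cs) with
    | some kv => kv.2 ++ pvScan tbl (cs.drop (kv.1.length - 1))
    | none => c :: pvScan tbl cs
  termination_by l.length
  decreasing_by
  · simp only [List.length_cons]
    have := List.length_drop (l := cs) (i := kv.1.length - 1)
    omega
  · simp

-- A clean structural form of Python's str.replace for a NONEMPTY needle.
def repC (old new : List Char) (l : List Char) : List Char :=
  match l with
  | [] => []
  | c :: cs =>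
    if old.isPrefixOf (c :: cs) then new ++ repC old new (cs.drop (old.length - 1))
    else c :: repC old new cs
  termination_by l.length
  decreasing_by
  · simp only [List.length_cons]
    have := List.length_drop (l := cs) (i := old.length - 1)
    omega
  · simp

lemma go_eq_repC (old new : List Char) (hold : old ≠ []) :
    ∀ fuel l acc, l.length ≤ fuel →
      PySem.Chars.replace.go old new fuel l acc = acc.reverse ++ repC old new l := by
  intro fuel
  induction fuel with
  | zero =>
    intro l acc h
    have : l = [] := List.length_eq_zero_iff.mp (Nat.le_zero.mp h)
    subst this
    simp [PySem.Chars.replace.go, repC]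
  | succ n ih =>
    intro l acc h
    match l with
    | [] => simp [PySem.Chars.replace.go, repC]
    | c :: cs =>
      rw [PySem.Chars.replace.go]
      by_cases hp : old.isPrefixOf (c :: cs)
      · simp only [hp, if_true]
        have hlen : (List.drop old.length (c :: cs)).length ≤ n := by
          have := List.length_drop (l := c :: cs) (i := old.length)
          have : old.length ≥ 1 := by cases old with | nil => exact absurd rfl hold | cons a b => simp
          simp at h ⊢
          omega
        rw [ih _ _ hlen]
        rw [repC]
        simp only [hp, if_true]
        have : List.drop old.length (c :: cs) = cs.drop (old.length - 1) := by
          cases hol : old with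
          | nil => exact absurd hol hold
          | cons a b => simp
        rw [this]
        simp
      · simp only [hp]
        have hlen : cs.length ≤ n := by simp at h; omega
        rw [ih _ _ hlen, repC]
        simp [hp]

lemma replace_eq_repC (old new l : List Char) (hold : old ≠ []) :
    PySem.Chars.replace l old new = repC old new l := by
  rw [PySem.Chars.replace]
  have : old.isEmpty = false := by cases old with | nil => exact absurd rfl hold | cons a b => rfl
  simp only [this]
  simpa using go_eq_repC old new hold l.length l [] le_rfl

lemma prefix_append_cases {u a b : List Char} (h : u <+: a ++ b) : u <+: a ∨ a <+: u :=
  List.prefix_or_prefix_of_prefix h (List.prefix_append a b)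

lemma repC_skip (t r L Y : List Char)
    (h : ∀ p, p < L.length → ¬ t.isPrefixOf (L.drop p ++ Y)) :
    repC t r (L ++ Y) = L ++ repC t r Y := by
  induction L with
  | nil => simp
  | cons c L' ih =>
    have h0 : ¬ t.isPrefixOf (c :: (L' ++ Y)) := by
      have := h 0 (by simp)
      simpa using this
    rw [List.cons_append, repC]
    simp only [h0, if_false, Bool.false_eq_true]
    rw [ih (fun p hp => by have := h (p + 1) (by simp; omega); simpa using this)]
    simp

lemma pvScan_skip (tbl : List (List Char × List Char)) (L Y : List Char)
    (h : ∀ p, p < L.length → pvFind tbl (L.drop p ++ Y) = none) :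
    pvScan tbl (L ++ Y) = L ++ pvScan tbl Y := by
  induction L with
  | nil => simp
  | cons c L' ih =>
    have h0 : pvFind tbl (c :: (L' ++ Y)) = none := by
      have := h 0 (by simp); simpa using this
    rw [List.cons_append, pvScan]
    simp only [h0]
    rw [ih (fun p hp => by have := h (p + 1) (by simp; omega); simpa using this)]
    simp

lemma noNew (t r : List Char) (u : List Char)
    (hu : ∀ m, m < u.length → ¬ (u.drop m <+: r) ∧ ¬ (r <+: u.drop m)) :
    ∀ X, u.isPrefixOf (repC t r X) → u.isPrefixOf X := by
  intro X
  induction X generalizing u with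
  | nil =>
    intro h
    rw [repC] at h
    exact h
  | cons c X' ih =>
    intro h
    rw [repC] at h
    split at h
    · match u, hu with
      | [], _ => simp
      | d :: u', hu =>
        exfalso
        have hpre : (d :: u') <+: r ++ repC t r (X'.drop (t.length - 1)) :=
          List.isPrefixOf_iff_prefix.mp h
        rcases prefix_append_cases hpre with h1 | h1
        · exact (hu 0 (by simp)).1 h1
        · exact (hu 0 (by simp)).2 h1
    · match u, hu with
      | [], _ => simp
      | d :: u', hu =>
        simp only [List.isPrefixOf] at h ⊢
        rcases (Bool.and_eq_true _ _).mp h with ⟨hdc, hrest⟩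
        refine (Bool.and_eq_true _ _).mpr ⟨hdc, ?_⟩
        exact ih u' (fun m hm => by have := hu (m+1) (by simp; omega); simpa using this) hrest

lemma pvScan_nil_tbl (l : List Char) : pvScan [] l = l := by
  induction l with
  | nil => rw [pvScan]
  | cons c cs ih =>
    rw [pvScan]
    simp only [pvFind, List.find?_nil]
    rw [ih]

def pvPW (tbl : List (List Char × List Char)) : Prop :=
  tbl.Pairwise (fun a b => ¬ (a.1 <+: b.1) ∧ ¬ (b.1 <+: a.1))

lemma pvFind_stable (tbl : List (List Char × List Char)) (ti ri : List Char)
    (hPW : pvPW tbl) (cs X : List Char)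
    (hfind : pvFind tbl cs = some (ti, ri)) :
    pvFind tbl (ti ++ X) = some (ti, ri) := by
  induction tbl with
  | nil => simp [pvFind] at hfind
  | cons kv rest ih =>
    rcases hPW with _ | ⟨hrel, hPW'⟩
    by_cases hp : kv.1.isPrefixOf cs
    · have : some kv = some (ti, ri) := by
        rw [pvFind, List.find?_cons_of_pos (h := by simpa using hp)] at hfind
        exact hfind
      have hkv : kv = (ti, ri) := by injection this
      subst hkv
      rw [pvFind, List.find?_cons_of_pos (h := by simp [List.isPrefixOf_iff_prefix])]
    · rw [pvFind, List.find?_cons_of_neg (h := by simpa using hp)] at hfind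
      have hmem : (ti, ri) ∈ rest := List.mem_of_find?_eq_some hfind
      have hrel' := hrel _ hmem
      have hhead : ¬ kv.1.isPrefixOf (ti ++ X) := by
        intro hc
        rcases prefix_append_cases (List.isPrefixOf_iff_prefix.mp hc) with h1 | h1
        · exact hrel'.1 h1
        · exact hrel'.2 h1
      rw [pvFind, List.find?_cons_of_neg (h := by simpa using hhead)]
      exact ih hPW' hfind

def pvGoodHead (t r : List Char) (rest : List (List Char × List Char)) : Prop :=
  t ≠ [] ∧
  (∀ kv ∈ rest, kv.1 ≠ [] ∧
    (∀ p, p < r.length → ¬ (kv.1 <+: r.drop p) ∧ ¬ (r.drop p <+: kv.1)) ∧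
    (∀ p, p < kv.1.length → p = 0 ∨ (¬ (t <+: kv.1.drop p) ∧ ¬ (kv.1.drop p <+: t))) ∧
    (∀ m, m < kv.1.length → ¬ (kv.1.drop m <+: r) ∧ ¬ (r <+: kv.1.drop m)))

def pvGood : List (List Char × List Char) → Prop
  | [] => True
  | (t, r) :: rest => pvGoodHead t r rest ∧ pvGood rest

lemma key_step (t r : List Char) (rest : List (List Char × List Char))
    (hG : pvGoodHead t r rest) (hPW : pvPW ((t, r) :: rest)) :
    ∀ l, pvScan rest (repC t r l) = pvScan ((t, r) :: rest) l := by
  obtain ⟨ht, hrest⟩ := hG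
  have htlen : 1 ≤ t.length := by
    cases t with | nil => exact absurd rfl ht | cons a b => simp
  have hPWrest : pvPW rest := (List.pairwise_cons.mp hPW).2
  have H : ∀ n, ∀ l : List Char, l.length ≤ n →
      pvScan rest (repC t r l) = pvScan ((t, r) :: rest) l := by
    intro n
    induction n with
    | zero =>
      intro l hl
      have : l = [] := List.length_eq_zero_iff.mp (Nat.le_zero.mp hl)
      subst this
      rw [repC, pvScan, pvScan]
    | succ n ih =>
      intro l hl
      match l with
      | [] => rw [repC, pvScan, pvScan]
      | c :: cs =>
        simp only [List.length_cons] at hl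
        by_cases hp : t.isPrefixOf (c :: cs)
        · have hfind : pvFind ((t, r) :: rest) (c :: cs) = some (t, r) := by
            rw [pvFind, List.find?_cons_of_pos (h := by simpa using hp)]
          rw [repC]
          simp only [hp, if_true]
          conv_rhs => rw [pvScan]
          simp only [hfind]
          rw [pvScan_skip rest r _ (fun p hpp => ?_)]
          · rw [ih _ (by have := List.length_drop (l := cs) (i := t.length - 1); omega)]
          · rw [pvFind, List.find?_eq_none]
            intro kv hmem
            obtain ⟨_, hC1, _, _⟩ := hrest kv hmem
            simp only [Bool.not_eq_true]
            rw [Bool.eq_false_iff]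
            intro hc
            rcases prefix_append_cases (List.isPrefixOf_iff_prefix.mp hc) with h1 | h1
            · exact (hC1 p hpp).1 h1
            · exact (hC1 p hpp).2 h1
        · cases hfr : pvFind rest (c :: cs) with
          | some kv =>
            obtain ⟨ti, ri⟩ := kv
            have hpre : ti.isPrefixOf (c :: cs) := by
              have := List.find?_some hfr
              simpa using this
            have hmem : (ti, ri) ∈ rest := List.mem_of_find?_eq_some hfr
            obtain ⟨htine, hC1, hC2, hC4⟩ := hrest _ hmem
            match hti : ti, htine with
            | d :: ti', _ =>
            simp only at hC2 hC4 ⊢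
            obtain ⟨rest', hsplit⟩ := List.isPrefixOf_iff_prefix.mp hpre
            have hdc : d = c := by
              have := congrArg (List.headI) hsplit
              simpa using this
            have hcs : ti' ++ rest' = cs := by
              have := congrArg (List.tail) hsplit
              simpa using this
            have hfind : pvFind ((t, r) :: rest) (c :: cs) = some (d :: ti', ri) := by
              rw [pvFind, List.find?_cons_of_neg (h := by simpa using hp)]
              exact hfr
            have hdrop : cs.drop ((d :: ti').length - 1) = rest' := by
              rw [← hcs]
              simp
            conv_rhs => rw [pvScan]
            simp only [hfind, hdrop]
            rw [← hsplit]
            rw [repC_skip t r (d :: ti') rest' (fun p hpp => ?_)]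
            · have hstable := pvFind_stable rest (d :: ti') ri hPWrest (c :: cs)
                (repC t r rest') hfr
              simp only [List.cons_append]
              conv_lhs => rw [pvScan]
              simp only [← List.cons_append, hstable]
              have hdrop2 : (ti' ++ repC t r rest').drop ((d :: ti').length - 1)
                  = repC t r rest' := by
                simp
              rw [hdrop2]
              have hlen' : rest'.length ≤ n := by
                have := congrArg List.length hcs
                simp at this
                omega
              rw [ih rest' hlen']
            · match p, hpp with
              | 0, _ =>
                simpa [hsplit] using hp
              | (q + 1), hpp =>
                intro hc
                simp only [List.length_cons] at hpp
                have hdq : (d :: ti').drop (q + 1) = ti'.drop q := by simp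
                rw [hdq] at hc
                have hC2' := hC2 (q + 1) (by simp; omega)
                rcases hC2' with h0 | ⟨hA, hB⟩
                · omega
                · rcases prefix_append_cases (List.isPrefixOf_iff_prefix.mp hc) with h1 | h1
                  · exact hA (by simpa using h1)
                  · exact hB (by simpa using h1)
          | none =>
            have hfind : pvFind ((t, r) :: rest) (c :: cs) = none := by
              rw [pvFind, List.find?_cons_of_neg (h := by simpa using hp)]
              exact hfr
            have hrepc : repC t r (c :: cs) = c :: repC t r cs := by
              rw [repC]
              simp [hp]
            rw [hrepc]
            have hnone2 : pvFind rest (c :: repC t r cs) = none := by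
              rw [pvFind, List.find?_eq_none]
              intro kv hmem
              obtain ⟨_, _, _, hC4⟩ := hrest kv hmem
              simp only [Bool.not_eq_true]
              rw [Bool.eq_false_iff]
              intro hc
              rw [← hrepc] at hc
              have hnn := noNew t r kv.1 hC4 (c :: cs) hc
              have hall := List.find?_eq_none.mp hfr kv hmem
              exact (by simpa using hall : ¬ kv.1 <+: c :: cs)
                (List.isPrefixOf_iff_prefix.mp hnn)
            conv_lhs => rw [pvScan]
            simp only [hnone2]
            conv_rhs => rw [pvScan]
            simp only [hfind]
            rw [ih cs (by omega)]
  intro l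
  exact H l.length l le_rfl

lemma main_chain (tbl : List (List Char × List Char)) (hG : pvGood tbl) (hPW : pvPW tbl) :
    ∀ l, tbl.foldl (fun l kv => repC kv.1 kv.2 l) l = pvScan tbl l := by
  induction tbl with
  | nil => intro l; simpa using (pvScan_nil_tbl l).symm
  | cons kv rest ih =>
    obtain ⟨t, r⟩ := kv
    obtain ⟨hGH, hGr⟩ := hG
    intro l
    rw [List.foldl_cons]
    rw [ih hGr (List.pairwise_cons.mp hPW).2 (repC t r l)]
    exact key_step t r rest hGH hPW l

lemma pvGood_table : pvGood pvTableC := by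
  simp only [pvTableC, pvMap, List.map_cons, List.map_nil, pvGood]
  repeat' apply And.intro
  all_goals first
  | exact trivial
  | decide

lemma pvPW_table : pvPW pvTableC := by
  unfold pvPW pvTableC pvMap
  decide

lemma portA_toList (pattern : String) :
    (posix_to_re pattern).toList = pvTableC.foldl (fun l kv => repC kv.1 kv.2 l) pattern.toList := by
  unfold posix_to_re pvTableC
  generalize pattern = s
  have : ∀ (m : List (String × String)) (s : String),
      (∀ kv ∈ m, kv.1.toList ≠ []) →
      (m.foldl (fun p kv => PySem.Str.replace p kv.1 kv.2) s).toList
        = (m.map (fun kv => (kv.1.toList, kv.2.toList))).foldl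
            (fun l kv => repC kv.1 kv.2 l) s.toList := by
    intro m
    induction m with
    | nil => intro s _; simp
    | cons kv rest ih =>
      intro s hne
      rw [List.foldl_cons, List.map_cons, List.foldl_cons]
      rw [ih _ (fun kv h => hne kv (List.mem_cons_of_mem _ h))]
      rw [PySem.Str.toList_replace]
      rw [replace_eq_repC _ _ _ (hne kv (List.mem_cons_self))]
  exact this pvMap s (by decide)

-- ========== the new layer: B's parsing scan equals the first-match scan ==========

-- A's table is exactly B's table with each name wrapped as '[:name:]'
set_option maxRecDepth 40000 in
lemma tbl_rel : pvTableC = pvClasses.map (fun kv => ('[' :: ':' :: (kv.1 ++ [':', ']']), kv.2)) := by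
  rfl

lemma names_lower_b : pvClasses.all (fun kv => kv.1.all pvIsLo) = true := by rfl

lemma names_lower : ∀ kv ∈ pvClasses, (∀ c ∈ kv.1, pvIsLo c = true) := by
  intro kv hkv c hc
  have h := names_lower_b
  rw [List.all_eq_true] at h
  have h2 := h kv hkv
  rw [List.all_eq_true] at h2
  exact h2 c hc

set_option maxRecDepth 8000 in
lemma keys_nodup : (pvClasses.map Prod.fst).Nodup := by decide

lemma colon_not_lo : pvIsLo ':' = false := by decide

lemma takeWhile_all_append (p : Char → Bool) (a : List Char) (x : Char) (ys : List Char)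
    (ha : ∀ c ∈ a, p c = true) (hx : p x = false) :
    (a ++ x :: ys).takeWhile p = a ∧ (a ++ x :: ys).dropWhile p = x :: ys := by
  induction a with
  | nil => simp [hx]
  | cons c a' ih =>
    have hc := ha c (by simp)
    have ih' := ih (fun c h => ha c (by simp [h]))
    simp [hc, ih'.1, ih'.2]

lemma find_key (xs : List (List Char × List Char)) (nm r : List Char)
    (hnd : (xs.map Prod.fst).Nodup) (hmem : (nm, r) ∈ xs) :
    xs.find? (fun kv => kv.1 == nm) = some (nm, r) := by
  induction xs with
  | nil => simp at hmem
  | cons kv rest ih =>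
    rw [List.map_cons] at hnd
    rcases List.nodup_cons.mp hnd with ⟨hn1, hn2⟩
    rcases List.mem_cons.mp hmem with heq | hmem'
    · subst heq
      rw [List.find?_cons_of_pos]
      simp
    · have hk : ¬ (kv.1 == nm) = true := by
        intro hb
        have hk1 : kv.1 = nm := by simpa using hb
        exact hn1 (by rw [hk1]; exact List.mem_map_of_mem hmem')
      rw [List.find?_cons_of_neg]
      · exact ih hn2 hmem'
      · exact hk

lemma pvFind_of_mem (tbl : List (List Char × List Char)) (hPW : pvPW tbl)
    (kv : List Char × List Char) (hmem : kv ∈ tbl) (l : List Char)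
    (hp : kv.1.isPrefixOf l = true) : pvFind tbl l = some kv := by
  induction tbl with
  | nil => simp at hmem
  | cons hd tl ih =>
    rcases List.pairwise_cons.mp hPW with ⟨hrel, hPW'⟩
    rcases List.mem_cons.mp hmem with heq | hmem'
    · subst heq
      rw [pvFind, List.find?_cons_of_pos]
      exact hp
    · have hhd : ¬ hd.1.isPrefixOf l = true := by
        intro hc
        rcases List.prefix_or_prefix_of_prefix (List.isPrefixOf_iff_prefix.mp hc)
            (List.isPrefixOf_iff_prefix.mp hp) with h1 | h1
        · exact (hrel kv hmem').1 h1
        · exact (hrel kv hmem').2 h1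
      rw [pvFind, List.find?_cons_of_neg]
      · exact ih hPW' hmem'
      · exact hhd

-- success inversion for pvTryClass
lemma pvTryClass_some (l : List Char) (rt : List Char × List Char)
    (h : pvTryClass l = some rt) :
    ∃ nm tail, (nm, rt.1) ∈ pvClasses ∧ l = '[' :: ':' :: (nm ++ ':' :: ']' :: tail) ∧
      rt.2 = tail := by
  unfold pvTryClass at h
  split at h
  · rename_i rest
    split at h
    · rename_i tail hdw
      split at h
      · rename_i kv hfd
        injection h with h
        subst h
        have hk : kv.1 = rest.takeWhile pvIsLo := by
          have := List.find?_some hfd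
          simpa using this
        have hmem : kv ∈ pvClasses := List.mem_of_find?_eq_some hfd
        refine ⟨kv.1, tail, by simpa using hmem, ?_, rfl⟩
        have hsplit : rest = rest.takeWhile pvIsLo ++ rest.dropWhile pvIsLo :=
          (List.takeWhile_append_dropWhile).symm
        rw [hdw, ← hk] at hsplit
        simp [hsplit]
      · exact absurd h (by simp)
    · exact absurd h (by simp)
  · exact absurd h (by simp)

-- pvTryClass after the '[:' pattern has matched, as a plain equation
lemma pvTryClass_eq (rest : List Char) : pvTryClass ('[' :: ':' :: rest) =
    (match rest.dropWhile pvIsLo with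
     | ':' :: ']' :: tail =>
       (match pvClasses.find? (fun kv => kv.1 == rest.takeWhile pvIsLo) with
        | some kv => some (kv.2, tail)
        | none => none)
     | _ => none) := rfl

-- if a table token is a prefix of l, then pvTryClass succeeds on l
lemma pvTryClass_of_prefix (nm r u : List Char) (hmem : (nm, r) ∈ pvClasses) :
    ∃ rt, pvTryClass ('[' :: ':' :: (nm ++ ':' :: ']' :: u)) = some rt := by
  have hlow := names_lower (nm, r) hmem
  have htw := takeWhile_all_append pvIsLo nm ':' (']' :: u) hlow colon_not_lo
  have hfd := find_key pvClasses nm r keys_nodup hmem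
  refine ⟨(r, u), ?_⟩
  rw [pvTryClass_eq, htw.2, htw.1, hfd]
  rfl

lemma scanB_eq : ∀ l, pvScanB l = pvScan pvTableC l := by
  have H : ∀ n, ∀ l : List Char, l.length ≤ n → pvScanB l = pvScan pvTableC l := by
    intro n
    induction n with
    | zero =>
      intro l hl
      have : l = [] := List.length_eq_zero_iff.mp (Nat.le_zero.mp hl)
      subst this
      rw [pvScanB, pvScan]
    | succ n ih =>
      intro l hl
      match l with
      | [] => rw [pvScanB, pvScan]
      | c :: cs =>
        simp only [List.length_cons] at hl
        cases hb : pvTryClass (c :: cs) with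
        | some rt =>
          obtain ⟨nm, tail, hmem, hshape, htail⟩ := pvTryClass_some _ _ hb
          -- the bracketed token is a prefix of l, so pvFind returns it
          have hmemT : ('[' :: ':' :: (nm ++ [':', ']']), rt.1) ∈ pvTableC := by
            rw [tbl_rel]
            exact List.mem_map_of_mem hmem
          have hpref : ('[' :: ':' :: (nm ++ [':', ']'])).isPrefixOf (c :: cs) = true := by
            rw [List.isPrefixOf_iff_prefix, hshape]
            exact ⟨tail, by simp⟩
          have hfind := pvFind_of_mem pvTableC pvPW_table _ hmemT (c :: cs) hpref
          have hBstep : pvScanB (c :: cs) = rt.1 ++ pvScanB rt.2 := by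
            rw [pvScanB]
            split <;> simp_all
          rw [hBstep]
          rw [pvScan]
          simp only [hfind]
          have hcs : cs = ':' :: (nm ++ ':' :: ']' :: tail) := by
            have := congrArg List.tail hshape
            simpa using this
          have hdrop : cs.drop (('[' :: ':' :: (nm ++ [':', ']'])).length - 1) = tail := by
            rw [hcs, show ('[' :: ':' :: (nm ++ [':', ']'])).length - 1
                  = (nm ++ [':', ']']).length + 1 by simp]
            rw [List.drop_succ_cons]
            rw [show (nm ++ ':' :: ']' :: tail) = (nm ++ [':', ']']) ++ tail by simp]
            exact List.drop_left
          rw [hdrop, htail]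
          have hlt : tail.length ≤ n := by
            have := congrArg List.length hshape
            simp at this
            omega
          rw [ih tail hlt]
        | none =>
          have hfind : pvFind pvTableC (c :: cs) = none := by
            cases hf : pvFind pvTableC (c :: cs) with
            | none => rfl
            | some kv =>
              exfalso
              have hmem := List.mem_of_find?_eq_some hf
              have hpre : kv.1 <+: c :: cs := by simpa using List.find?_some hf
              rw [tbl_rel] at hmem
              obtain ⟨⟨nm, r⟩, hmem', hkv⟩ := List.mem_map.mp hmem
              subst hkv
              obtain ⟨u, hu⟩ := hpre
              simp only at hu
              have hshape : c :: cs = '[' :: ':' :: (nm ++ ':' :: ']' :: u) := by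
                rw [← hu]
                simp
              obtain ⟨rt, hrt⟩ := pvTryClass_of_prefix nm r u hmem'
              rw [← hshape] at hrt
              rw [hb] at hrt
              exact absurd hrt (by simp)
          have hBstep : pvScanB (c :: cs) = c :: pvScanB cs := by
            rw [pvScanB]
            split <;> simp_all
          rw [hBstep]
          rw [pvScan]
          simp only [hfind]
          rw [ih cs (by omega)]
  intro l
  exact H l.length l le_rfl

-- ===== VERDICT (by name: the statement is the Claim_ definition above) =====
theorem posix_to_re_spec : Claim_equal_posix_to_re := by
  intro pattern _
  unfold Spec_posix_to_re posix_to_re_alt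
  have h := portA_toList pattern
  rw [main_chain pvTableC pvGood_table pvPW_table] at h
  rw [scanB_eq]
  rw [← h, String.ofList_toList]
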